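-- pv_equiv track=rewrite | github.com/chetankumarpulipati/groq-hackathon | agents/diagnostic_agent.py | _identify_chief_complaint
-- ===== SOURCE A (Python) =====
-- from typing import Dict, Any, Optional, List, Tuple
--
-- def _identify_chief_complaint(symptoms: List) -> str:
--     """Identify the primary chief complaint."""
--     if not symptoms:
--         return "No specific complaint identified"
--
--     # Find most severe symptom
--     severe_symptoms = [s for s in symptoms if s.get("severity") == "severe"]
--     if severe_symptoms:
--         return severe_symptoms[0].get("name", "Severe symptom")
--
--     # Find moderate symptoms
--     moderate_symptoms = [s for s in symptoms if s.get("severity") == "moderate"]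
--     if moderate_symptoms:
--         return moderate_symptoms[0].get("name", "Moderate symptom")
--
--     return symptoms[0].get("name", "Mild symptom")
-- ===== SOURCE B (Python) =====
-- def _identify_chief_complaint(symptoms):
--     """Identify the primary chief complaint (single early-exit pass)."""
--     if not symptoms:
--         return "No specific complaint identified"
--     first_moderate = None
--     for s in symptoms:
--         sev = s.get("severity")
--         if sev == "severe":
--             return s.get("name", "Severe symptom")
--         if sev == "moderate" and first_moderate is None:
--             first_moderate = s
--     if first_moderate is not None:
--         return first_moderate.get("name", "Moderate symptom")
--     return symptoms[0].get("name", "Mild symptom")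
-- ===== Notes on version B (the rewrite author's own statement) =====
-- stated objective: simpler
-- what changed: Replaced the two list-building filter passes with one early-exit traversal that returns on the first severe symptom and records the first moderate one.
import Mathlib
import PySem

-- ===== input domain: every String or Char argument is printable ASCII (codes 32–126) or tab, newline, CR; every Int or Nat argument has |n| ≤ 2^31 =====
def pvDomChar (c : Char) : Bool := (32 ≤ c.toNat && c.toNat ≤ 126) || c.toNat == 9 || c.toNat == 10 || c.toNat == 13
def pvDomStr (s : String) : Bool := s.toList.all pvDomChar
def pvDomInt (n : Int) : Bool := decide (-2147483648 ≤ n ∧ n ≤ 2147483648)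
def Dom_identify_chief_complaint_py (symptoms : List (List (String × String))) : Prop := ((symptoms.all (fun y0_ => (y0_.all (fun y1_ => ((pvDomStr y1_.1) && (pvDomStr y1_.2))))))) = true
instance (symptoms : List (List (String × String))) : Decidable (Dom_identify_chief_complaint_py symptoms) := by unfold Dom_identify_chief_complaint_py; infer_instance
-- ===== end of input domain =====

-- B replaces A's two filter passes with one early-exit traversal; objective: simpler.

-- ===== PORT A =====
def identify_chief_complaint_py (symptoms : List (List (String × String))) : String :=
  match symptoms with
  | [] => "No specific complaint identified"
  | s0 :: _ =>
    let severe_symptoms := symptoms.filter (fun s => (PySem.Dict.mk s).get? "severity" == some "severe")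
    match severe_symptoms with
    | s :: _ => (PySem.Dict.mk s).getD "name" "Severe symptom"
    | [] =>
      let moderate_symptoms := symptoms.filter (fun s => (PySem.Dict.mk s).get? "severity" == some "moderate")
      match moderate_symptoms with
      | s :: _ => (PySem.Dict.mk s).getD "name" "Moderate symptom"
      | [] => (PySem.Dict.mk s0).getD "name" "Mild symptom"

-- ===== PORT B =====
def identify_chief_complaint_loop (rest : List (List (String × String)))
    (firstModerate : Option (List (String × String))) (first : List (String × String)) : String :=
  match rest with
  | [] =>
    match firstModerate with
    | some m => (PySem.Dict.mk m).getD "name" "Moderate symptom"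
    | none => (PySem.Dict.mk first).getD "name" "Mild symptom"
  | s :: t =>
    let sev := (PySem.Dict.mk s).get? "severity"
    if sev == some "severe" then (PySem.Dict.mk s).getD "name" "Severe symptom"
    else if sev == some "moderate" && firstModerate.isNone then
      identify_chief_complaint_loop t (some s) first
    else identify_chief_complaint_loop t firstModerate first

def identify_chief_complaint_py_alt (symptoms : List (List (String × String))) : String :=
  match symptoms with
  | [] => "No specific complaint identified"
  | s0 :: _ => identify_chief_complaint_loop symptoms none s0

-- ===== PRECONDITION & SPEC =====
def Spec_identify_chief_complaint_py (symptoms : List (List (String × String))) (out : String) : Prop := out = identify_chief_complaint_py_alt symptoms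
instance (symptoms : List (List (String × String))) (out : String) : Decidable (Spec_identify_chief_complaint_py symptoms out) := by unfold Spec_identify_chief_complaint_py; infer_instance

-- ===== CLAIM (what is proved, stated in full; the proofs are below) =====
def Claim_equal_identify_chief_complaint_py : Prop := ∀ (symptoms : List (List (String × String))), Dom_identify_chief_complaint_py symptoms → Spec_identify_chief_complaint_py symptoms (identify_chief_complaint_py symptoms)

-- ===== LEMMAS AND PROOFS =====

-- the loop computes exactly A's "severe else (recorded-or-scanned moderate) else first" result
lemma loop_char (l : List (List (String × String)))
    (fm : Option (List (String × String))) (first : List (String × String)) :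
    identify_chief_complaint_loop l fm first =
      (match l.filter (fun s => (PySem.Dict.mk s).get? "severity" == some "severe") with
       | s :: _ => (PySem.Dict.mk s).getD "name" "Severe symptom"
       | [] =>
         match (match fm with
                | some m => some m
                | none => (l.filter (fun s => (PySem.Dict.mk s).get? "severity" == some "moderate")).head?) with
         | some m => (PySem.Dict.mk m).getD "name" "Moderate symptom"
         | none => (PySem.Dict.mk first).getD "name" "Mild symptom") := by
  induction l generalizing fm with
  | nil => cases fm <;> simp [identify_chief_complaint_loop]
  | cons s t ih =>
    by_cases hs : ((PySem.Dict.mk s).get? "severity" == some "severe") = true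
    · simp [identify_chief_complaint_loop, hs]
    · by_cases hm : ((PySem.Dict.mk s).get? "severity" == some "moderate") = true
      · cases fm with
        | none =>
          simp [identify_chief_complaint_loop, hs, hm, ih]
        | some m =>
          simp [identify_chief_complaint_loop, hs, hm, ih]
      · cases fm <;>
          simp [identify_chief_complaint_loop, hs, hm, ih]

-- ===== VERDICT (by name: the statement is the Claim_ definition above) =====
theorem identify_chief_complaint_py_spec : Claim_equal_identify_chief_complaint_py := by
  intro symptoms _
  unfold Spec_identify_chief_complaint_py identify_chief_complaint_py identify_chief_complaint_py_alt
  cases symptoms with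
  | nil => rfl
  | cons s0 rest =>
    simp only []
    rw [loop_char]
    rcases h : (s0 :: rest).filter (fun s => (PySem.Dict.mk s).get? "severity" == some "severe") with _ | ⟨a, l⟩
    · rcases h2 : (s0 :: rest).filter (fun s => (PySem.Dict.mk s).get? "severity" == some "moderate") with _ | ⟨b, l2⟩ <;> simp
    · simp
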